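-- pv_equiv track=rewrite | github.com/ttzytt/PyAutoGrade | tests/Block 4/tested_code/9/file_reading.py | all_vowels_counter
-- ===== SOURCE A (Python) =====
-- def all_vowels_counter(read_file):
--     vowels = 'aeiou'
--     count = 0
--     for line in read_file:
--         words = line.split()
--         for word in words:
--             if ('a' in word.lower() and 'e' in word.lower()
--                 and 'i' in word.lower() and 'o' in word.lower()
--                 and 'u' in word.lower()):
--                 count += 1
--
--     return count
-- ===== SOURCE B (Python) =====
-- def all_vowels_counter(read_file):
--     count = 0
--     for line in read_file:
--         seen = set()
--         for ch in line:
--             if ch.isspace():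
--                 if len(seen) == 5:
--                     count += 1
--                 seen = set()
--             else:
--                 low = ch.lower()
--                 if low in 'aeiou':
--                     seen.add(low)
--         if len(seen) == 5:
--             count += 1
--     return count
-- ===== Notes on version B (the rewrite author's own statement) =====
-- stated objective: alternative
-- what changed: Replaces split() plus five independent substring scans per word by a single character-level streaming state machine per line that maintains a running seen-vowel set and finalizes a word at each whitespace boundary.
import Mathlib
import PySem

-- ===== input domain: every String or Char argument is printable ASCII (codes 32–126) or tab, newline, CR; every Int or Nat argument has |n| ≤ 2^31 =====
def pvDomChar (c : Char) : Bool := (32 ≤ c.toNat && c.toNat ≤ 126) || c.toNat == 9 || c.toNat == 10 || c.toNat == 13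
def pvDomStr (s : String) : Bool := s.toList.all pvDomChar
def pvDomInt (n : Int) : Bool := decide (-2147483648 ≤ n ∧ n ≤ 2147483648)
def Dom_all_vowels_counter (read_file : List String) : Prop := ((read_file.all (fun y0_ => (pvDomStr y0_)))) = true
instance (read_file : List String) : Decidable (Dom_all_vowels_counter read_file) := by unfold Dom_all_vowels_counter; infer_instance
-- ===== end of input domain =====

-- B replaces split() plus five substring scans per word by a character-level streaming state
-- machine per line: a running seen-vowel set, finalized at each whitespace boundary.

-- ===== PORT A =====
def all_vowels_counter (read_file : List String) : Int :=
  read_file.foldl (fun count line =>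
    (PySem.Str.split₀ line).foldl (fun count word =>
      if PySem.Str.isIn "a" (PySem.Str.lower word) && PySem.Str.isIn "e" (PySem.Str.lower word)
         && PySem.Str.isIn "i" (PySem.Str.lower word) && PySem.Str.isIn "o" (PySem.Str.lower word)
         && PySem.Str.isIn "u" (PySem.Str.lower word)
      then count + 1 else count) count) 0

-- ===== PORT B =====
-- ch.lower() on a single character is ported as PySem.Chars.lowerChar (exact on the ASCII domain).
def all_vowels_counter_alt (read_file : List String) : Int :=
  read_file.foldl (fun count line =>
    let st := line.toList.foldl (fun (st : Int × PySem.Set Char) ch =>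
        if PySem.Chars.isspace ch then
          (if PySem.Set.len st.2 == 5 then st.1 + 1 else st.1, PySem.Set.empty)
        else
          let low := PySem.Chars.lowerChar ch
          if PySem.Chars.isIn [low] "aeiou".toList then (st.1, PySem.Set.add st.2 low) else st)
      (count, PySem.Set.empty)
    if PySem.Set.len st.2 == 5 then st.1 + 1 else st.1) 0

-- ===== PRECONDITION & SPEC =====
def Spec_all_vowels_counter (read_file : List String) (out : Int) : Prop := out = all_vowels_counter_alt read_file
instance (read_file : List String) (out : Int) : Decidable (Spec_all_vowels_counter read_file out) := by unfold Spec_all_vowels_counter; infer_instance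

-- ===== CLAIM (what is proved, stated in full; the proofs are below) =====
def Claim_equal_all_vowels_counter : Prop := ∀ (read_file : List String), Dom_all_vowels_counter read_file → Spec_all_vowels_counter read_file (all_vowels_counter read_file)

-- ===== LEMMAS AND PROOFS =====

def pvVowels : List Char := ['a', 'e', 'i', 'o', 'u']

-- A's per-word test, on the character-list side.
def pvCondA (w : List Char) : Bool :=
  PySem.Chars.isIn ['a'] (PySem.Chars.lower w) && PySem.Chars.isIn ['e'] (PySem.Chars.lower w)
  && PySem.Chars.isIn ['i'] (PySem.Chars.lower w) && PySem.Chars.isIn ['o'] (PySem.Chars.lower w)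
  && PySem.Chars.isIn ['u'] (PySem.Chars.lower w)

-- B's per-character transition.
def pvStep (st : Int × PySem.Set Char) (ch : Char) : Int × PySem.Set Char :=
  if PySem.Chars.isspace ch then
    (if PySem.Set.len st.2 == 5 then st.1 + 1 else st.1, PySem.Set.empty)
  else
    let low := PySem.Chars.lowerChar ch
    if PySem.Chars.isIn [low] "aeiou".toList then (st.1, PySem.Set.add st.2 low) else st

def pvFin (st : Int × PySem.Set Char) : Int :=
  if PySem.Set.len st.2 == 5 then st.1 + 1 else st.1

-- the seen-set after streaming the characters of a (space-free) word
def pvSeen (w : List Char) : PySem.Set Char :=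
  w.foldl (fun s ch =>
    if PySem.Chars.isIn [PySem.Chars.lowerChar ch] "aeiou".toList
    then PySem.Set.add s (PySem.Chars.lowerChar ch) else s) PySem.Set.empty

theorem pv_isIn_singleton (x : Char) (l : List Char) :
    PySem.Chars.isIn [x] l = decide (x ∈ l) := by
  rw [Bool.eq_iff_iff]
  simp [PySem.Chars.isIn_iff_infix, List.singleton_infix_iff]

theorem pv_seen_eq_ofList (w : List Char) :
    pvSeen w = PySem.Set.ofList ((PySem.Chars.lower w).filter (fun c => decide (c ∈ pvVowels))) := by
  rw [pvSeen, PySem.Set.ofList_eq_foldl]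
  have key : ∀ (w : List Char) (s : PySem.Set Char),
      w.foldl (fun s ch =>
        if PySem.Chars.isIn [PySem.Chars.lowerChar ch] "aeiou".toList
        then PySem.Set.add s (PySem.Chars.lowerChar ch) else s) s
      = ((PySem.Chars.lower w).filter (fun c => decide (c ∈ pvVowels))).foldl PySem.Set.add s := by
    intro w
    induction w with
    | nil => intro s; simp [PySem.Chars.lower]
    | cons c t ih =>
      intro s
      simp only [List.foldl_cons, PySem.Chars.lower, List.map_cons, List.filter_cons]
      rw [pv_isIn_singleton]
      have hv : ("aeiou".toList : List Char) = pvVowels := by decide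
      rw [hv]
      by_cases h : PySem.Chars.lowerChar c ∈ pvVowels
      · simp only [h, decide_true]
        simpa [PySem.Chars.lower] using ih (PySem.Set.add s (PySem.Chars.lowerChar c))
      · simp only [h, decide_false]
        simpa [PySem.Chars.lower] using ih s
  exact key w PySem.Set.empty

-- KEY: the streamed seen-set is full iff A's five-way membership test holds.
theorem pv_seen_full_iff (w : List Char) :
    (PySem.Set.len (pvSeen w) == 5) = pvCondA w := by
  rw [pv_seen_eq_ofList, Bool.eq_iff_iff]
  set L := (PySem.Chars.lower w).filter (fun c => decide (c ∈ pvVowels)) with hL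
  have hnd : (PySem.Set.ofList L).Nodup := PySem.Set.nodup_ofList L
  have hsub : (PySem.Set.ofList L) ⊆ pvVowels := by
    intro x hx
    have : x ∈ L := (PySem.Set.mem_ofList L x).mp hx
    have := List.of_mem_filter this
    simpa using this
  have hsp : (PySem.Set.ofList L).Subperm pvVowels := hnd.subperm hsub
  have hmemL : ∀ v ∈ pvVowels, (v ∈ L ↔ v ∈ PySem.Chars.lower w) := by
    intro v hv
    constructor
    · intro h; exact List.mem_of_mem_filter h
    · intro h; exact List.mem_filter.mpr ⟨h, by simpa using hv⟩
  have hcond : pvCondA w = true ↔ ∀ v ∈ pvVowels, v ∈ PySem.Chars.lower w := by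
    simp only [pvCondA, Bool.and_eq_true, pv_isIn_singleton, decide_eq_true_eq]
    constructor
    · rintro ⟨⟨⟨⟨ha, he⟩, hi⟩, ho⟩, hu⟩ v hv
      fin_cases hv <;> assumption
    · intro h
      refine ⟨⟨⟨⟨h 'a' ?_, h 'e' ?_⟩, h 'i' ?_⟩, h 'o' ?_⟩, h 'u' ?_⟩ <;> decide
  constructor
  · intro h
    have hlen : (PySem.Set.ofList L).length = 5 := by
      have := of_decide_eq_true (by simpa [PySem.Set.len] using h)
      omega
    have hperm : (PySem.Set.ofList L).Perm pvVowels :=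
      hsp.perm_of_length_le (by rw [hlen]; decide)
    rw [hcond]
    intro v hv
    exact (hmemL v hv).mp ((PySem.Set.mem_ofList L v).mp ((hperm.mem_iff).mpr hv))
  · intro h
    have hall : ∀ v ∈ pvVowels, v ∈ PySem.Set.ofList L := by
      intro v hv
      exact (PySem.Set.mem_ofList L v).mpr ((hmemL v hv).mpr (hcond.mp h v hv))
    have hvn : (pvVowels : List Char).Nodup := by decide
    have hsp2 : pvVowels.Subperm (PySem.Set.ofList L) := hvn.subperm hall
    have h1 : 5 ≤ (PySem.Set.ofList L).length := by simpa using hsp2.length_le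
    have h2 : (PySem.Set.ofList L).length ≤ 5 := by simpa using hsp.length_le
    have : (PySem.Set.ofList L).length = 5 := le_antisymm h2 h1
    simp [PySem.Set.len, this]

-- go with a nonempty accumulator just prepends the already-emitted words.
theorem pv_go_acc (l : List Char) : ∀ (cur : List Char) (acc : List (List Char)),
    PySem.Chars.split₀.go l cur acc = acc.reverse ++ PySem.Chars.split₀.go l cur [] := by
  induction l with
  | nil =>
    intro cur acc
    by_cases h : cur.isEmpty <;> simp [PySem.Chars.split₀.go, h]
  | cons c rest ih =>
    intro cur acc
    by_cases hs : PySem.Chars.isspace c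
    · by_cases hc : cur.isEmpty
      · simp only [PySem.Chars.split₀.go, hs, hc, if_true]
        exact ih [] acc
      · simp only [PySem.Chars.split₀.go, hs, hc, if_true, if_false, Bool.false_eq_true]
        rw [ih [] (cur.reverse :: acc), ih [] [cur.reverse]]
        simp
    · simp only [PySem.Chars.split₀.go, hs, Bool.false_eq_true, if_false]
      exact ih (c :: cur) acc

def pvBump (w : List Char) : Int := if pvCondA w then 1 else 0

theorem pv_fin_seen (c : Int) (w : List Char) :
    pvFin (c, pvSeen w) = c + pvBump w := by
  rw [pvFin, pvBump, pv_seen_full_iff]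
  split_ifs <;> omega

-- MAIN invariant: streaming the rest of a line, with a pending word w already read,
-- counts exactly the all-vowel words among split₀.go's output.
theorem pv_stream (l : List Char) : ∀ (c : Int) (w : List Char),
    pvFin (l.foldl pvStep (c, pvSeen w))
    = c + ((PySem.Chars.split₀.go l w.reverse []).countP pvCondA : Int) := by
  induction l with
  | nil =>
    intro c w
    by_cases h : w.isEmpty
    · have hw : w = [] := by simpa [List.isEmpty_iff] using h
      subst hw
      have hgo : PySem.Chars.split₀.go ([] : List Char) [] [] = [] := rfl
      rw [List.foldl_nil, List.reverse_nil, hgo, pv_fin_seen]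
      have hb : pvBump [] = 0 := by decide
      simp [hb]
    · have hw : w ≠ [] := by simpa [List.isEmpty_iff] using h
      rw [List.foldl_nil, pv_fin_seen]
      have hemp : (w.reverse).isEmpty = false := by
        simpa [List.isEmpty_iff] using hw
      have hgo : PySem.Chars.split₀.go ([] : List Char) w.reverse [] = [w] := by
        simp [PySem.Chars.split₀.go, hemp]
      rw [hgo, List.countP_cons, List.countP_nil, pvBump]
      split_ifs with hcc <;> simp
  | cons ch rest ih =>
    intro c w
    by_cases hs : PySem.Chars.isspace ch
    · have hstep : pvStep (c, pvSeen w) ch = (c + pvBump w, pvSeen []) := by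
        have h1 : pvFin (c, pvSeen w) = c + pvBump w := pv_fin_seen c w
        simp only [pvStep, hs, if_true]
        rw [Prod.mk.injEq]
        exact ⟨by simpa [pvFin] using h1, rfl⟩
      rw [List.foldl_cons, hstep, ih (c + pvBump w) []]
      by_cases hc : w.isEmpty
      · have hw : w = [] := by simpa [List.isEmpty_iff] using hc
        subst hw
        have hb : pvBump [] = 0 := by decide
        simp [PySem.Chars.split₀.go, hs, hb]
      · have : (w.reverse).isEmpty = false := by
          simpa [List.isEmpty_iff] using (by simpa [List.isEmpty_iff] using hc : w ≠ [])
        simp only [PySem.Chars.split₀.go, hs, this, Bool.false_eq_true, if_false]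
        rw [pv_go_acc rest [] [w.reverse.reverse]]
        simp only [List.reverse_cons, List.reverse_nil, List.nil_append, List.reverse_reverse]
        rw [pvBump]
        split_ifs with h <;> simp [h] <;> ring
    · have hstep : pvStep (c, pvSeen w) ch = (c, pvSeen (w ++ [ch])) := by
        simp only [pvStep, hs, Bool.false_eq_true, if_false, pvSeen, List.foldl_append,
          List.foldl_cons, List.foldl_nil]
        split_ifs <;> rfl
      rw [List.foldl_cons, hstep, ih c (w ++ [ch])]
      simp [PySem.Chars.split₀.go, hs]
-- ===== per-line and per-word bridges =====

theorem pv_condA_str (word : String) :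
    (PySem.Str.isIn "a" (PySem.Str.lower word) && PySem.Str.isIn "e" (PySem.Str.lower word)
      && PySem.Str.isIn "i" (PySem.Str.lower word) && PySem.Str.isIn "o" (PySem.Str.lower word)
      && PySem.Str.isIn "u" (PySem.Str.lower word)) = pvCondA word.toList := by
  simp [pvCondA, PySem.Str.isIn, PySem.Str.lower, PySem.Chars.isIn]

theorem pv_line (c : Int) (line : String) :
    pvFin (line.toList.foldl pvStep (c, PySem.Set.empty))
    = c + (((PySem.Str.split₀ line).countP (fun word =>
        PySem.Str.isIn "a" (PySem.Str.lower word) && PySem.Str.isIn "e" (PySem.Str.lower word)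
        && PySem.Str.isIn "i" (PySem.Str.lower word) && PySem.Str.isIn "o" (PySem.Str.lower word)
        && PySem.Str.isIn "u" (PySem.Str.lower word))) : Int) := by
  have h0 : PySem.Set.empty = pvSeen ([] : List Char) := rfl
  rw [h0, pv_stream line.toList c []]
  have : (PySem.Str.split₀ line).countP (fun word =>
        PySem.Str.isIn "a" (PySem.Str.lower word) && PySem.Str.isIn "e" (PySem.Str.lower word)
        && PySem.Str.isIn "i" (PySem.Str.lower word) && PySem.Str.isIn "o" (PySem.Str.lower word)
        && PySem.Str.isIn "u" (PySem.Str.lower word))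
      = (PySem.Chars.split₀ line.toList).countP pvCondA := by
    rw [← PySem.Str.split₀_map_toList, List.countP_map]
    exact List.countP_congr (fun w _ => by rw [Function.comp_apply, pv_condA_str])
  rw [this]
  rfl

-- ===== VERDICT (by name: the statement is the Claim_ definition above) =====
theorem all_vowels_counter_spec : Claim_equal_all_vowels_counter := by
  intro read_file _
  unfold Spec_all_vowels_counter all_vowels_counter all_vowels_counter_alt
  congr 1
  funext count line
  rw [PySem.List.foldl_count_if]
  exact (pv_line count line).symm
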